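-- pv_equiv track=rewrite | github.com/zangyuchen2008/bank_chatbot | QA_robot.py | get_merged_doc
-- ===== SOURCE A (Python) =====
-- from operator import and_, or_
-- from functools import reduce
-- from itertools import combinations
--
-- def get_merged_doc(doc_ids):
--     i = len(doc_ids)
--     result_sets =set()
--     while i>0:
--         sets_combis = list(combinations(doc_ids,i))
--         for sets in sets_combis:
--             set_and_set = set(reduce(and_, sets))
--             if set_and_set: result_sets = or_(result_sets,set_and_set)
--         if not result_sets: i= i-1
--         else: break
--     if result_sets: return result_sets
--     else: return None
-- ===== SOURCE B (Python) =====
-- def get_merged_doc(doc_ids):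
--     counts = {}
--     for s in doc_ids:
--         for x in s:
--             counts[x] = counts.get(x, 0) + 1
--     if not counts:
--         return None
--     m = max(counts.values())
--     return {x for x in counts if counts[x] == m}
-- ===== Notes on version B (the rewrite author's own statement) =====
-- stated objective: faster
-- what changed: Replaces A's descending search over all combination sizes (intersecting every i-subset of doc_ids via reduce(and_) and unioning the nonempty intersections) with a single frequency-counting pass over the elements followed by a max-selection; Pre_ only excludes inner lists with duplicate elements, which do not represent Python set inputs.
import Mathlib
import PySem

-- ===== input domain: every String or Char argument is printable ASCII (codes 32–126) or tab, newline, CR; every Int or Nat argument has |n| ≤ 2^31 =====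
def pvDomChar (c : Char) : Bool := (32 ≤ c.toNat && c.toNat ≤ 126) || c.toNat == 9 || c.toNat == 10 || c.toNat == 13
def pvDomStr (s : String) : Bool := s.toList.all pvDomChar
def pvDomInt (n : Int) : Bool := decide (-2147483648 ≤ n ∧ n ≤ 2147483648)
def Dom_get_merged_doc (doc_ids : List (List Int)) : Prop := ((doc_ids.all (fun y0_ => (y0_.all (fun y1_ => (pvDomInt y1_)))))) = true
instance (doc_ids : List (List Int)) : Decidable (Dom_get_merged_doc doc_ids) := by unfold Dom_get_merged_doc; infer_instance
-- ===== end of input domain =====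

-- B replaces A's descending search over all combinations (intersect each combination, from
-- the largest size down) by a single counting pass plus a max-selection: simpler and faster.
-- Both Pythons return a *set* (iteration order unspecified in Python); both ports represent
-- the returned set by the sorted list of its elements — exact as a set, which is how set
-- outputs are compared.

-- ===== PORT A =====
-- canonical list representation of a returned Python set (shared by both ports)
def pvSetOut (s : PySem.Set Int) : List Int := PySem.List.sorted s (fun x => x) false

-- itertools.combinations(xs, i) (tuples in lexicographic index order)
def pvCombos : Nat → List (List Int) → List (List (List Int))
  | 0, _ => [[]]
  | _ + 1, [] => []
  | i + 1, x :: xs => ((pvCombos i xs).map (fun t => x :: t)) ++ pvCombos (i + 1) xs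

-- reduce(and_, sets): fold set-intersection over the tuple starting from its head
def pvReduceInter : List (List Int) → List Int
  | [] => []
  | s :: rest => rest.foldl PySem.Set.inter s

-- the inner `for sets in sets_combis:` loop at level i
def pvStep (doc_ids : List (List Int)) (i : Nat) (result : PySem.Set Int) : PySem.Set Int :=
  (pvCombos i doc_ids).foldl
    (fun r sets =>
      let set_and_set := PySem.Set.ofList (pvReduceInter sets)
      if set_and_set = [] then r else PySem.Set.union r set_and_set)
    result

-- the `while i > 0:` loop (decrement when result_sets is still empty, else break)
def pvWhile (doc_ids : List (List Int)) : Nat → PySem.Set Int → PySem.Set Int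
  | 0, result => result
  | i + 1, result =>
      let r := pvStep doc_ids (i + 1) result
      if r = [] then pvWhile doc_ids i r else r

def get_merged_doc (doc_ids : List (List Int)) : Option (List Int) :=
  let result_sets := pvWhile doc_ids doc_ids.length PySem.Set.empty
  if result_sets = [] then none else some (pvSetOut result_sets)

-- ===== PORT B =====
def get_merged_doc_alt (doc_ids : List (List Int)) : Option (List Int) :=
  let counts : PySem.Dict Int Int :=
    doc_ids.foldl (fun d s => s.foldl (fun d x => d.modify x 0 (· + 1)) d) PySem.Dict.empty
  if counts.size = 0 then none
  else
    match PySem.List.max? counts.values (fun v => v) with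
    | none => none   -- unreachable: counts is nonempty here
    | some m => some (pvSetOut ((counts.keys).filter (fun x => counts.getD x 0 == m)))

-- ===== PRECONDITION & SPEC =====
-- Pre_ requires every inner list to be duplicate-free: doc_ids models a list of Python *sets*
-- (A applies set-intersection to them), so a duplicate-containing list represents no Python input.
def Pre_get_merged_doc (doc_ids : List (List Int)) : Prop := ∀ s ∈ doc_ids, s.Nodup
instance (doc_ids : List (List Int)) : Decidable (Pre_get_merged_doc doc_ids) := by
  unfold Pre_get_merged_doc; infer_instance
def pvWitness_get_merged_doc : List (List Int) := [[1, 2], [2]]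

def Spec_get_merged_doc (doc_ids : List (List Int)) (out : Option (List Int)) : Prop := out = get_merged_doc_alt doc_ids
instance (doc_ids : List (List Int)) (out : Option (List Int)) : Decidable (Spec_get_merged_doc doc_ids out) := by unfold Spec_get_merged_doc; infer_instance

-- ===== CLAIM (what is proved, stated in full; the proofs are below) =====
def Claim_equal_get_merged_doc : Prop := ∀ (doc_ids : List (List Int)), Dom_get_merged_doc doc_ids → Pre_get_merged_doc doc_ids → Spec_get_merged_doc doc_ids (get_merged_doc doc_ids)

-- ===== LEMMAS AND PROOFS =====

-- number of sets of doc_ids containing x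
def pvCnt (doc_ids : List (List Int)) (x : Int) : Nat :=
  doc_ids.countP (fun s => decide (x ∈ s))

theorem pvReduceInter_mem (rest : List (List Int)) (s : List Int) (x : Int) :
    x ∈ rest.foldl PySem.Set.inter s ↔ x ∈ s ∧ ∀ t ∈ rest, x ∈ t := by
  induction rest generalizing s with
  | nil => simp
  | cons t rest ih => simp [List.foldl_cons, ih, PySem.Set.mem_inter]; tauto

theorem pvCombos_mem (xs : List (List Int)) (i : Nat) (S : List (List Int)) :
    S ∈ pvCombos i xs ↔ S.length = i ∧ S.Sublist xs := by
  induction xs generalizing i S with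
  | nil =>
    cases i with
    | zero => simp [pvCombos, List.length_eq_zero_iff]
    | succ i =>
      simp only [pvCombos, List.not_mem_nil, false_iff, not_and]
      intro h hs
      simp [List.sublist_nil] at hs
      simp [hs] at h
  | cons y ys ih =>
    cases i with
    | zero =>
      constructor
      · intro h; simp [pvCombos] at h; simp [h, List.nil_sublist]
      · intro ⟨h, _⟩; simp [List.length_eq_zero_iff] at h; simp [pvCombos, h]
    | succ i =>
      simp only [pvCombos, List.mem_append, List.mem_map, ih]
      constructor
      · rintro (⟨t, ⟨hlen, hsub⟩, rfl⟩ | ⟨hlen, hsub⟩)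
        · exact ⟨by simp [hlen], List.cons_sublist_cons.mpr hsub⟩
        · exact ⟨hlen, hsub.trans (List.sublist_cons_self y ys)⟩
      · rintro ⟨hlen, hsub⟩
        rcases List.sublist_cons_iff.mp hsub with h | ⟨r, rfl, hr⟩
        · exact Or.inr ⟨hlen, h⟩
        · exact Or.inl ⟨r, ⟨by simpa using hlen, hr⟩, rfl⟩

theorem pvFold_mem (L : List (List (List Int))) (r0 : PySem.Set Int) (x : Int) :
    x ∈ L.foldl
        (fun r sets =>
          let set_and_set := PySem.Set.ofList (pvReduceInter sets)
          if set_and_set = [] then r else PySem.Set.union r set_and_set) r0 ↔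
      x ∈ r0 ∨ ∃ S ∈ L, x ∈ PySem.Set.ofList (pvReduceInter S) := by
  induction L generalizing r0 with
  | nil => simp
  | cons S L ih =>
    simp only [List.foldl_cons, ih, List.mem_cons]
    by_cases h : PySem.Set.ofList (pvReduceInter S) = []
    · rw [if_pos h]
      constructor
      · rintro (hx | ⟨T, hT, hxT⟩)
        exacts [Or.inl hx, Or.inr ⟨T, Or.inr hT, hxT⟩]
      · rintro (hx | ⟨T, hT', hxT⟩)
        · exact Or.inl hx
        · rcases hT' with rfl | hT
          · rw [h] at hxT; simp at hxT
          · exact Or.inr ⟨T, hT, hxT⟩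
    · rw [if_neg h]
      simp only [PySem.Set.mem_union]
      constructor
      · rintro ((hx | hxS) | ⟨T, hT, hxT⟩)
        exacts [Or.inl hx, Or.inr ⟨S, Or.inl rfl, hxS⟩, Or.inr ⟨T, Or.inr hT, hxT⟩]
      · rintro (hx | ⟨T, hT', hxT⟩)
        · exact Or.inl (Or.inl hx)
        · rcases hT' with rfl | hT
          exacts [Or.inl (Or.inr hxT), Or.inr ⟨T, hT, hxT⟩]

theorem pvCombos_all_mem (doc_ids : List (List Int)) (i : Nat) (x : Int) :
    (∃ S ∈ pvCombos i doc_ids, ∀ t ∈ S, x ∈ t) ↔ i ≤ pvCnt doc_ids x := by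
  constructor
  · rintro ⟨S, hS, hall⟩
    rcases (pvCombos_mem doc_ids i S).mp hS with ⟨hlen, hsub⟩
    have hfe : S.filter (fun s => decide (x ∈ s)) = S :=
      List.filter_eq_self.mpr (fun t ht => by simpa using hall t ht)
    have h2 := hsub.filter (fun s => decide (x ∈ s))
    rw [hfe] at h2
    have h3 := h2.length_le
    rw [pvCnt, List.countP_eq_length_filter]
    omega
  · intro h
    refine ⟨(doc_ids.filter (fun s => decide (x ∈ s))).take i, ?_, ?_⟩
    · refine (pvCombos_mem doc_ids i _).mpr ⟨?_, ?_⟩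
      · have : i ≤ (doc_ids.filter (fun s => decide (x ∈ s))).length := by
          simpa [pvCnt, List.countP_eq_length_filter] using h
        simp [List.length_take, this]
      · exact (List.take_sublist _ _).trans List.filter_sublist
    · intro t ht
      have : t ∈ doc_ids.filter (fun s => decide (x ∈ s)) :=
        (List.take_sublist _ _).mem ht
      simpa using (List.of_mem_filter this)

theorem pvStep_mem (doc_ids : List (List Int)) (i : Nat) (r0 : PySem.Set Int) (x : Int) :
    x ∈ pvStep doc_ids (i + 1) r0 ↔ x ∈ r0 ∨ i + 1 ≤ pvCnt doc_ids x := by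
  rw [pvStep, pvFold_mem]
  refine or_congr Iff.rfl ?_
  rw [← pvCombos_all_mem doc_ids (i + 1) x]
  constructor
  · rintro ⟨S, hS, hxS⟩
    refine ⟨S, hS, ?_⟩
    rcases (pvCombos_mem doc_ids (i+1) S).mp hS with ⟨hlen, -⟩
    cases S with
    | nil => simp at hlen
    | cons s rest =>
      rw [PySem.Set.mem_ofList] at hxS
      rcases (pvReduceInter_mem rest s x).mp (by simpa [pvReduceInter] using hxS) with ⟨h1, h2⟩
      intro t ht
      rcases List.mem_cons.mp ht with rfl | ht
      · exact h1
      · exact h2 t ht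
  · rintro ⟨S, hS, hall⟩
    refine ⟨S, hS, ?_⟩
    rcases (pvCombos_mem doc_ids (i+1) S).mp hS with ⟨hlen, -⟩
    cases S with
    | nil => simp at hlen
    | cons s rest =>
      rw [PySem.Set.mem_ofList]
      simp only [pvReduceInter]
      exact (pvReduceInter_mem rest s x).mpr
        ⟨hall s (by simp), fun t ht => hall t (by simp [ht])⟩

theorem pvStep_nodup (doc_ids : List (List Int)) (i : Nat) (r0 : PySem.Set Int)
    (h : r0.Nodup) : (pvStep doc_ids i r0).Nodup := by
  rw [pvStep]
  induction (pvCombos i doc_ids) generalizing r0 with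
  | nil => exact h
  | cons S L ih =>
    simp only [List.foldl_cons]
    split
    · exact ih r0 h
    · exact ih _ (PySem.Set.nodup_union _ _ h)

theorem pvWhile_nodup (doc_ids : List (List Int)) (i : Nat) (r0 : PySem.Set Int)
    (h : r0.Nodup) : (pvWhile doc_ids i r0).Nodup := by
  induction i generalizing r0 with
  | zero => exact h
  | succ i ih =>
    rw [pvWhile]
    split
    · exact ih _ (by simp_all)
    · exact pvStep_nodup doc_ids (i + 1) r0 h

theorem pvCnt_pos_mem (doc_ids : List (List Int)) (x : Int)
    (h : 0 < pvCnt doc_ids x) : x ∈ doc_ids.flatten := by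
  rw [pvCnt, List.countP_eq_length_filter] at h
  obtain ⟨s, hs⟩ := List.exists_mem_of_ne_nil _ (List.length_pos_iff.mp h)
  have h1 := List.mem_of_mem_filter hs
  have h2 := List.of_mem_filter hs
  exact List.mem_flatten.mpr ⟨s, h1, by simpa using h2⟩

theorem pvMem_cnt_pos (doc_ids : List (List Int)) (x : Int)
    (h : x ∈ doc_ids.flatten) : 0 < pvCnt doc_ids x := by
  obtain ⟨s, hs, hxs⟩ := List.mem_flatten.mp h
  rw [pvCnt, List.countP_eq_length_filter]
  have : s ∈ doc_ids.filter (fun t => decide (x ∈ t)) := List.mem_filter.mpr ⟨hs, by simpa⟩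
  exact List.length_pos_iff.mpr (List.ne_nil_of_mem this)

theorem pvWhile_mem (doc_ids : List (List Int)) (i : Nat) (x : Int) :
    x ∈ pvWhile doc_ids i [] ↔
      1 ≤ i ∧ 1 ≤ pvCnt doc_ids x ∧
        ∀ y ∈ doc_ids.flatten, min (pvCnt doc_ids y) i ≤ pvCnt doc_ids x := by
  induction i with
  | zero => simp [pvWhile]
  | succ i ih =>
    rw [pvWhile]
    by_cases h : pvStep doc_ids (i + 1) [] = []
    · rw [if_pos h, h, ih]
      have hall : ∀ y : Int, pvCnt doc_ids y ≤ i := by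
        intro y
        by_contra hy
        have hmem : y ∈ pvStep doc_ids (i + 1) [] :=
          (pvStep_mem doc_ids i [] y).mpr (Or.inr (by omega))
        rw [h] at hmem
        simp at hmem
      constructor
      · rintro ⟨h1, h2, h3⟩
        refine ⟨by omega, h2, fun y hy => ?_⟩
        have := hall y
        have := h3 y hy
        omega
      · rintro ⟨h1, h2, h3⟩
        have hx := hall x
        refine ⟨by omega, h2, fun y hy => ?_⟩
        have := hall y
        have := h3 y hy
        omega
    · rw [if_neg h, pvStep_mem]
      simp only [List.not_mem_nil, false_or]
      obtain ⟨x0, hx0⟩ := List.exists_mem_of_ne_nil _ h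
      have hx0c : i + 1 ≤ pvCnt doc_ids x0 := by
        rcases (pvStep_mem doc_ids i [] x0).mp hx0 with h' | h'
        · simp at h'
        · exact h'
      have hx0f : x0 ∈ doc_ids.flatten := pvCnt_pos_mem doc_ids x0 (by omega)
      constructor
      · intro hc
        refine ⟨by omega, by omega, fun y hy => ?_⟩
        omega
      · rintro ⟨-, -, h3⟩
        have := h3 x0 hx0f
        omega

theorem pvCnt_eq_count_flatten (doc_ids : List (List Int)) (h : ∀ s ∈ doc_ids, s.Nodup)
    (x : Int) : doc_ids.flatten.count x = pvCnt doc_ids x := by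
  induction doc_ids with
  | nil => simp [pvCnt]
  | cons s rest ih =>
    have hs : s.count x = if x ∈ s then 1 else 0 := by
      split
      · exact List.count_eq_one_of_mem (h s (by simp)) (by assumption)
      · exact List.count_eq_zero.mpr (by assumption)
    have hih := ih (fun t ht => h t (by simp [ht]))
    simp only [List.flatten_cons, List.count_append, hs, hih, pvCnt, List.countP_cons,
      decide_eq_true_eq]
    split_ifs <;> omega

theorem pvCnt_le_length (doc_ids : List (List Int)) (x : Int) :
    pvCnt doc_ids x ≤ doc_ids.length := List.countP_le_length

theorem get_merged_doc_spec' (doc_ids : List (List Int))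
    (hpre : Pre_get_merged_doc doc_ids) :
    get_merged_doc doc_ids = get_merged_doc_alt doc_ids := by
  have hcc : ∀ x : Int, doc_ids.flatten.count x = pvCnt doc_ids x :=
    pvCnt_eq_count_flatten doc_ids hpre
  have hcounts : doc_ids.foldl (fun d s => s.foldl (fun d x => d.modify x 0 (· + 1)) d)
      PySem.Dict.empty = PySem.Dict.counter doc_ids.flatten := by
    rw [PySem.Dict.counter_eq_foldl, List.foldl_flatten]
  rw [get_merged_doc, get_merged_doc_alt]
  simp only [hcounts]
  by_cases hF : doc_ids.flatten = []
  · have hA : pvWhile doc_ids doc_ids.length PySem.Set.empty = [] := by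
      rw [List.eq_nil_iff_forall_not_mem]
      intro a ha
      have h1 := (pvWhile_mem doc_ids doc_ids.length a).mp ha
      have hpos := pvCnt_pos_mem doc_ids a (by omega)
      rw [hF] at hpos
      simp at hpos
    rw [hA, hF]
    rfl
  · have hne : PySem.Set.ofList doc_ids.flatten ≠ [] := by
      obtain ⟨y, hy⟩ := List.exists_mem_of_ne_nil _ hF
      exact List.ne_nil_of_mem ((PySem.Set.mem_ofList _ _).mpr hy)
    have hsz : (PySem.Dict.counter doc_ids.flatten).size ≠ 0 := by
      simp only [PySem.Dict.size, PySem.Dict.items_counter, List.length_map]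
      exact fun h0 => hne (List.length_eq_zero_iff.mp h0)
    rw [if_neg hsz]
    have hvals : (PySem.Dict.counter doc_ids.flatten).values
        = (PySem.Set.ofList doc_ids.flatten).map (fun k => ((doc_ids.flatten.count k : Int))) := by
      simp only [PySem.Dict.values, PySem.Dict.items_counter, List.map_map]
      rfl
    obtain ⟨m, hm⟩ : ∃ m, PySem.List.max?
        (PySem.Dict.counter doc_ids.flatten).values (fun v => v) = some m := by
      cases hmx : PySem.List.max? (PySem.Dict.counter doc_ids.flatten).values (fun v => v) with
      | none =>
        rw [PySem.List.max?_eq_none_iff, hvals] at hmx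
        exact absurd (List.map_eq_nil_iff.mp hmx) hne
      | some m => exact ⟨m, rfl⟩
    rw [hm]
    obtain ⟨k0, hk0F, hk0m⟩ : ∃ k0 ∈ doc_ids.flatten, (pvCnt doc_ids k0 : Int) = m := by
      have h1 := PySem.List.max?_mem hm
      rw [hvals] at h1
      obtain ⟨k0, hk0, hk⟩ := List.mem_map.mp h1
      exact ⟨k0, (PySem.Set.mem_ofList _ _).mp hk0, by rw [← hk, hcc k0]⟩
    have hmax : ∀ y ∈ doc_ids.flatten, pvCnt doc_ids y ≤ pvCnt doc_ids k0 := by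
      intro y hy
      have hyv : ((doc_ids.flatten.count y : Int)) ∈
          (PySem.Dict.counter doc_ids.flatten).values := by
        rw [hvals]
        exact List.mem_map_of_mem ((PySem.Set.mem_ofList _ _).mpr hy)
      have h2 := PySem.List.max?_isMax hm _ hyv
      rw [hcc, ← hk0m] at h2
      exact_mod_cast h2
    have hlen1 : 1 ≤ doc_ids.length := by
      cases doc_ids with
      | nil => simp at hF
      | cons a l => simp
    have hAmem : ∀ x, x ∈ pvWhile doc_ids doc_ids.length PySem.Set.empty ↔
        (1 ≤ pvCnt doc_ids x ∧ ∀ y ∈ doc_ids.flatten, pvCnt doc_ids y ≤ pvCnt doc_ids x) := by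
      intro x
      rw [show (PySem.Set.empty : PySem.Set Int) = [] from rfl, pvWhile_mem]
      constructor
      · rintro ⟨-, h2, h3⟩
        refine ⟨h2, fun y hy => ?_⟩
        have h4 := h3 y hy
        have h5 := pvCnt_le_length doc_ids y
        omega
      · rintro ⟨h2, h3⟩
        refine ⟨hlen1, h2, fun y hy => ?_⟩
        have := h3 y hy
        omega
    have hBmem : ∀ x, x ∈ ((PySem.Dict.counter doc_ids.flatten).keys.filter
          (fun x => (PySem.Dict.counter doc_ids.flatten).getD x 0 == m)) ↔
        (x ∈ doc_ids.flatten ∧ (pvCnt doc_ids x : Int) = m) := by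
      intro x
      rw [List.mem_filter, PySem.Dict.keys_counter]
      simp only [PySem.Set.mem_ofList, PySem.Dict.getD_counter, hcc x, beq_iff_eq]
    have hsame : ∀ x, x ∈ pvWhile doc_ids doc_ids.length PySem.Set.empty ↔
        x ∈ ((PySem.Dict.counter doc_ids.flatten).keys.filter
          (fun x => (PySem.Dict.counter doc_ids.flatten).getD x 0 == m)) := by
      intro x
      rw [hAmem, hBmem]
      constructor
      · rintro ⟨h1, h2⟩
        have hx : x ∈ doc_ids.flatten := pvCnt_pos_mem doc_ids x (by omega)
        refine ⟨hx, ?_⟩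
        have hle := h2 k0 hk0F
        have hge := hmax x hx
        have hEq : pvCnt doc_ids x = pvCnt doc_ids k0 := by omega
        rw [hEq]
        exact hk0m
      · rintro ⟨hx, hxm⟩
        refine ⟨pvMem_cnt_pos doc_ids x hx, fun y hy => ?_⟩
        have h6 := hmax y hy
        have h7 : pvCnt doc_ids k0 = pvCnt doc_ids x := by
          have := hk0m.trans hxm.symm
          exact_mod_cast this
        omega
    have hAne : pvWhile doc_ids doc_ids.length PySem.Set.empty ≠ [] := by
      refine List.ne_nil_of_mem ((hAmem k0).mpr ⟨?_, fun y hy => hmax y hy⟩)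
      have := pvMem_cnt_pos doc_ids k0 hk0F
      omega
    rw [if_neg hAne]
    congr 1
    unfold pvSetOut
    refine PySem.List.sorted_eq_sorted_of_perm _ _ _ (fun a b h => h) ?_
    refine (List.perm_ext_iff_of_nodup ?_ ?_).mpr hsame
    · exact pvWhile_nodup doc_ids doc_ids.length PySem.Set.empty List.nodup_nil
    · refine List.Nodup.filter _ ?_
      rw [PySem.Dict.keys_counter]
      exact PySem.Set.nodup_ofList _

-- ===== VERDICT (by name: the statement is the Claim_ definition above) =====
theorem get_merged_doc_spec : Claim_equal_get_merged_doc :=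
  fun doc_ids _ hpre => get_merged_doc_spec' doc_ids hpre
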